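-- pv_equiv track=rewrite | github.com/jpisard/smbproxy | seekscale_commons/seekscale_commons/base.py | ascii36decode
-- ===== SOURCE A (Python) =====
-- import string
--
-- def ascii36decode(value):
--     letters = string.digits + string.ascii_uppercase
--     num_letters = len(letters)
--
--     mul = 1
--     s = 0
--
--     for letter in value:
--         s += letters.find(letter) * mul
--
--         mul *= num_letters
--
--     return s
-- ===== SOURCE B (Python) =====
-- import string
--
-- def ascii36decode(value):
--     letters = string.digits + string.ascii_uppercase
--     s = 0
--     for c in reversed(value):
--         s = s * 36 + letters.find(c)
--     return s
-- ===== Notes on version B (the rewrite author's own statement) =====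
-- stated objective: faster
-- what changed: Replaces the little-endian accumulation with a separate power variable `mul` by Horner's method over the reversed string, dropping `mul` entirely so no growing bignum power 36^i is maintained and multiplied per step.
import Mathlib
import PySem

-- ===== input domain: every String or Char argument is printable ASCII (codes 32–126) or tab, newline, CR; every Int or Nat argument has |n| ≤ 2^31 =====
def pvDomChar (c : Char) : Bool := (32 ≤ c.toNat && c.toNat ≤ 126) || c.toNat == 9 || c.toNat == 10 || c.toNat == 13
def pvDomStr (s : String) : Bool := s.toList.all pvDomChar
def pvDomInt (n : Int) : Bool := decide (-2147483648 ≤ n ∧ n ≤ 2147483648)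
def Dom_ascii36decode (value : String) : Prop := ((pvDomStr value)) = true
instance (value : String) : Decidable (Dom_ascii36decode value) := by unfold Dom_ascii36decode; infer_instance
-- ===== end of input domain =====

-- B replaces A's separate power accumulator `mul` by Horner's method over the reversed string (simpler; same cost).

-- letters = string.digits + string.ascii_uppercase
def letters36 : String := "0123456789ABCDEFGHIJKLMNOPQRSTUVWXYZ"

-- letters.find(letter)  (-1 if absent), shared verbatim by both Pythons
def find36 (c : Char) : Int := PySem.Str.find letters36 (String.mk [c])

-- ===== PORT A =====
-- state (mul, s); per letter: s += letters.find(letter) * mul; mul *= 36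
def ascii36decode (value : String) : Int :=
  (value.toList.foldl (fun (st : Int × Int) c => (st.1 * 36, st.2 + find36 c * st.1)) (1, 0)).2

-- ===== PORT B =====
-- s = 0; for c in reversed(value): s = s * 36 + letters.find(c)
def ascii36decode_alt (value : String) : Int :=
  value.toList.reverse.foldl (fun s c => s * 36 + find36 c) 0

-- ===== PRECONDITION & SPEC =====
def Spec_ascii36decode (value : String) (out : Int) : Prop := out = ascii36decode_alt value
instance (value : String) (out : Int) : Decidable (Spec_ascii36decode value out) := by unfold Spec_ascii36decode; infer_instance

-- ===== CLAIM (what is proved, stated in full; the proofs are below) =====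
def Claim_equal_ascii36decode : Prop := ∀ (value : String), Dom_ascii36decode value → Spec_ascii36decode value (ascii36decode value)

-- ===== LEMMAS AND PROOFS =====
theorem ascii36_loop (l : List Char) (mul s : Int) :
    (l.foldl (fun (st : Int × Int) c => (st.1 * 36, st.2 + find36 c * st.1)) (mul, s)).2
      = s + mul * l.reverse.foldl (fun s c => s * 36 + find36 c) 0 := by
  induction l generalizing mul s with
  | nil => simp
  | cons c t ih =>
    simp only [List.foldl_cons, List.reverse_cons, List.foldl_append, List.foldl_cons,
      List.foldl_nil, ih]
    ring

-- ===== VERDICT (by name: the statement is the Claim_ definition above) =====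
theorem ascii36decode_spec : Claim_equal_ascii36decode := by
  intro value _
  show _ = _
  unfold ascii36decode ascii36decode_alt
  rw [ascii36_loop]
  ring
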